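-- pv_equiv track=rewrite | github.com/Iftekhar-mobin/AI-system | Experiment/features/Tag_recommender/methods/sequencer.py | find_common_terms_between_synonym_list
-- ===== SOURCE A (Python) =====
-- def find_common_terms_between_synonym_list(tag_synonyms, query_synonyms):
--     synonym_saver = []
--     for chunks, synonyms in tag_synonyms:
--         for chunks_query, synonyms_query in query_synonyms:
--             common_terms = list(set(synonyms).intersection(synonyms_query))
--             if common_terms:
--                 synonym_saver.append([chunks, common_terms])
--
--     collector = []
--     for chunks, matched in synonym_saver:
--         collector.append(chunks)
--
--     return collector
-- ===== SOURCE B (Python) =====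
-- def find_common_terms_between_synonym_list(tag_synonyms, query_synonyms):
--     # Inverted index: synonym term -> set of query indices containing it.
--     index = {}
--     for i, (_, synonyms_query) in enumerate(query_synonyms):
--         for term in synonyms_query:
--             index.setdefault(term, set()).add(i)
--     collector = []
--     for chunks, synonyms in tag_synonyms:
--         hits = set()
--         for term in synonyms:
--             hits |= index.get(term, set())
--         collector.extend([chunks] * len(hits))
--     return collector
-- ===== Notes on version B (the rewrite author's own statement) =====
-- stated objective: faster
-- what changed: Replaced the all-pairs tag x query intersection scan with an inverted index from synonym term to query indices, built once; each tag emits its chunk repeated by the size of the union of its terms' posting sets.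
import Mathlib
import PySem

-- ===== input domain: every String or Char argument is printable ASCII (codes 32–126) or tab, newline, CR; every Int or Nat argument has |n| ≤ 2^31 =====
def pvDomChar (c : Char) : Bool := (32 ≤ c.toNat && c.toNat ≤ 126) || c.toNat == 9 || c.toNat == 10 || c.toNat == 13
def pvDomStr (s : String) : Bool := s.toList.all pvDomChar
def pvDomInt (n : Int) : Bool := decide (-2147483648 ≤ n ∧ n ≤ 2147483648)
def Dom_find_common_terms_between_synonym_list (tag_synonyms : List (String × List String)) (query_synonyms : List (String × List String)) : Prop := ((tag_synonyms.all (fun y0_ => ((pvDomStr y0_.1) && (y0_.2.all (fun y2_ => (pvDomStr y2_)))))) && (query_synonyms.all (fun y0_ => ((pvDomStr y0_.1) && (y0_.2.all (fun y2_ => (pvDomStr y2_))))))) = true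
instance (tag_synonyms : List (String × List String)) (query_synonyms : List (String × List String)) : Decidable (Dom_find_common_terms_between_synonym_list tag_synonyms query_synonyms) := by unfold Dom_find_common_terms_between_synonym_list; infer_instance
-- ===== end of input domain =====

-- B replaces A's all-pairs tag×query intersection scan by an inverted index term → query indices (objective: faster, asymptotic).

-- ===== PORT A =====
-- Note: list(set(synonyms).intersection(synonyms_query)) iterates a set in hash order, but only the
-- list's emptiness reaches the returned value; it is ported as PySem.Set.inter (emptiness is exact).
def find_common_terms_between_synonym_list (tag_synonyms : List (String × List String)) (query_synonyms : List (String × List String)) : List String :=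
  let synonym_saver : List (String × List String) :=
    tag_synonyms.foldl (fun acc p =>
      query_synonyms.foldl (fun acc2 q =>
        let common_terms : List String := PySem.Set.inter (PySem.Set.ofList p.2) q.2
        if common_terms ≠ [] then acc2 ++ [(p.1, common_terms)] else acc2) acc) []
  synonym_saver.foldl (fun collector pr => collector ++ [pr.1]) []

-- ===== PORT B =====
-- index.setdefault(term, set()).add(i)  ==  index[term] = index.get(term, set()) | {i}  (Dict.modify)
def pvIndex (query_synonyms : List (String × List String)) : PySem.Dict String (PySem.Set Int) :=
  (PySem.List.enumerate query_synonyms).foldl (fun d iq =>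
    iq.2.2.foldl (fun d' term => d'.modify term [] (fun s => PySem.Set.add s iq.1)) d)
    PySem.Dict.empty

def pvHits (index : PySem.Dict String (PySem.Set Int)) (terms : List String) : PySem.Set Int :=
  terms.foldl (fun h term => PySem.Set.union h (index.getD term [])) []

def find_common_terms_between_synonym_list_alt (tag_synonyms : List (String × List String)) (query_synonyms : List (String × List String)) : List String :=
  let index := pvIndex query_synonyms
  tag_synonyms.foldl (fun collector p =>
    collector ++ List.replicate (pvHits index p.2).length p.1) []

-- ===== PRECONDITION & SPEC =====
def Spec_find_common_terms_between_synonym_list (tag_synonyms : List (String × List String)) (query_synonyms : List (String × List String)) (out : List String) : Prop := out = find_common_terms_between_synonym_list_alt tag_synonyms query_synonyms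
instance (tag_synonyms : List (String × List String)) (query_synonyms : List (String × List String)) (out : List String) : Decidable (Spec_find_common_terms_between_synonym_list tag_synonyms query_synonyms out) := by unfold Spec_find_common_terms_between_synonym_list; infer_instance

-- ===== CLAIM (what is proved, stated in full; the proofs are below) =====
def Claim_equal_find_common_terms_between_synonym_list : Prop := ∀ (tag_synonyms : List (String × List String)) (query_synonyms : List (String × List String)), Dom_find_common_terms_between_synonym_list tag_synonyms query_synonyms → Spec_find_common_terms_between_synonym_list tag_synonyms query_synonyms (find_common_terms_between_synonym_list tag_synonyms query_synonyms)

-- ===== LEMMAS AND PROOFS =====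

-- the Bool predicate "this query shares a synonym with tag-synonym list ts"
def pvShares (ts : List String) (q : String × List String) : Bool :=
  decide (∃ t ∈ ts, t ∈ q.2)

-- A's intersection test agrees with pvShares
lemma pv_inter_ne_nil_iff (ts : List String) (q : String × List String) :
    (PySem.Set.inter (PySem.Set.ofList ts) q.2 ≠ []) ↔ pvShares ts q = true := by
  unfold pvShares
  simp only [decide_eq_true_eq]
  constructor
  · intro h
    obtain ⟨x, hx⟩ := List.exists_mem_of_ne_nil _ h
    have := (PySem.Set.mem_inter (PySem.Set.ofList ts) q.2 x).mp hx
    rw [PySem.Set.mem_ofList] at this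
    exact ⟨x, this.1, this.2⟩
  · rintro ⟨t, ht, htq⟩
    have : t ∈ PySem.Set.inter (PySem.Set.ofList ts) q.2 :=
      (PySem.Set.mem_inter _ _ t).mpr ⟨(PySem.Set.mem_ofList _ _).mpr ht, htq⟩
    exact List.ne_nil_of_mem this

-- A in closed form
lemma pvA_eq (tag_synonyms query_synonyms : List (String × List String)) :
    find_common_terms_between_synonym_list tag_synonyms query_synonyms
      = tag_synonyms.flatMap (fun p =>
          (query_synonyms.filter (pvShares p.2)).map (fun _ => p.1)) := by
  unfold find_common_terms_between_synonym_list
  have hinner : ∀ (p : String × List String) (acc : List (String × List String)),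
      query_synonyms.foldl (fun acc2 q =>
        let common_terms : List String := PySem.Set.inter (PySem.Set.ofList p.2) q.2
        if common_terms ≠ [] then acc2 ++ [(p.1, common_terms)] else acc2) acc
      = acc ++ (query_synonyms.filter (pvShares p.2)).map
          (fun q => (p.1, PySem.Set.inter (PySem.Set.ofList p.2) q.2)) := by
    intro p acc
    rw [show (fun acc2 (q : String × List String) =>
        let common_terms : List String := PySem.Set.inter (PySem.Set.ofList p.2) q.2
        if common_terms ≠ [] then acc2 ++ [(p.1, common_terms)] else acc2)
      = (fun acc2 q => if pvShares p.2 q = true then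
          acc2 ++ [(p.1, PySem.Set.inter (PySem.Set.ofList p.2) q.2)] else acc2) from ?_]
    · exact PySem.List.foldl_append_if _ _ _ _
    · funext acc2 q
      by_cases h : pvShares p.2 q = true
      · rw [if_pos ((pv_inter_ne_nil_iff p.2 q).mpr h), if_pos h]
      · rw [if_neg (fun hc => h ((pv_inter_ne_nil_iff p.2 q).mp hc)), if_neg h]
  rw [PySem.List.foldl_append_singleton_eq_map (fun pr : String × List String => pr.1)]
  simp only [hinner]
  rw [PySem.List.foldl_append_eq_flatMap (fun p : String × List String =>
        (query_synonyms.filter (pvShares p.2)).map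
          (fun q => (p.1, PySem.Set.inter (PySem.Set.ofList p.2) q.2)))]
  simp [List.map_flatMap, List.map_map, Function.comp_def, List.map_const']

-- membership of the inner setdefault-add loop
lemma pv_mem_inner (terms : List String) (d : PySem.Dict String (PySem.Set Int))
    (j : Int) (t : String) (i : Int) :
    i ∈ (terms.foldl (fun d' term => d'.modify term [] (fun s => PySem.Set.add s j)) d).getD t []
      ↔ i ∈ d.getD t [] ∨ (t ∈ terms ∧ i = j) := by
  induction terms generalizing d with
  | nil => simp
  | cons u rest ih =>
    simp only [List.foldl_cons, ih, PySem.Dict.getD_modify, List.mem_cons]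
    by_cases h : t = u
    · subst h
      simp [PySem.Set.mem_add]
      tauto
    · rw [if_neg h]
      constructor
      · rintro (hi | hr)
        · exact Or.inl hi
        · exact Or.inr ⟨Or.inr hr.1, hr.2⟩
      · rintro (hi | ⟨hu | hr, hj⟩)
        · exact Or.inl hi
        · exact absurd hu h
        · exact Or.inr ⟨hr, hj⟩

-- membership of the index built over the enumerated query list
lemma pv_mem_build (l : List (Int × (String × List String)))
    (d : PySem.Dict String (PySem.Set Int)) (t : String) (i : Int) :
    i ∈ (l.foldl (fun d iq =>
          iq.2.2.foldl (fun d' term => d'.modify term [] (fun s => PySem.Set.add s iq.1)) d)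
          d).getD t []
      ↔ i ∈ d.getD t [] ∨ ∃ iq ∈ l, t ∈ iq.2.2 ∧ i = iq.1 := by
  induction l generalizing d with
  | nil => simp
  | cons iq rest ih =>
    simp only [List.foldl_cons, ih, pv_mem_inner, List.mem_cons]
    constructor
    · rintro ((hi | hr) | ⟨jq, hjq, hj⟩)
      · exact Or.inl hi
      · exact Or.inr ⟨iq, Or.inl rfl, hr⟩
      · exact Or.inr ⟨jq, Or.inr hjq, hj⟩
    · rintro (hi | ⟨jq, hjq | hjq, hj⟩)
      · exact Or.inl (Or.inl hi)
      · exact Or.inl (Or.inr (hjq ▸ hj))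
      · exact Or.inr ⟨jq, hjq, hj⟩

-- membership of the hits union loop
lemma pv_mem_hits (terms : List String) (f : String → PySem.Set Int)
    (h0 : PySem.Set Int) (i : Int) :
    i ∈ terms.foldl (fun h term => PySem.Set.union h (f term)) h0
      ↔ i ∈ h0 ∨ ∃ t ∈ terms, i ∈ f t := by
  induction terms generalizing h0 with
  | nil => simp
  | cons u rest ih =>
    simp only [List.foldl_cons, ih, PySem.Set.mem_union, List.mem_cons]
    constructor
    · rintro ((hi | hu) | ⟨t, ht, hit⟩)
      · exact Or.inl hi
      · exact Or.inr ⟨u, Or.inl rfl, hu⟩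
      · exact Or.inr ⟨t, Or.inr ht, hit⟩
    · rintro (hi | ⟨t, rfl | ht, hit⟩)
      · exact Or.inl (Or.inl hi)
      · exact Or.inl (Or.inr hit)
      · exact Or.inr ⟨t, ht, hit⟩

-- the hits union loop produces a duplicate-free list
lemma pv_nodup_hits (terms : List String) (f : String → PySem.Set Int)
    (h0 : PySem.Set Int) (hn : h0.Nodup) :
    (terms.foldl (fun h term => PySem.Set.union h (f term)) h0).Nodup := by
  induction terms generalizing h0 with
  | nil => exact hn
  | cons u rest ih => exact ih _ (PySem.Set.nodup_union _ _ hn)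

-- per tag: the size of the union of posting sets counts the matching queries
lemma pv_hits_len (query_synonyms : List (String × List String)) (ts : List String) :
    (pvHits (pvIndex query_synonyms) ts).length
      = (query_synonyms.filter (pvShares ts)).length := by
  unfold pvHits pvIndex
  set E := PySem.List.enumerate query_synonyms with hE
  set hits := ts.foldl (fun h term =>
      PySem.Set.union h
        ((E.foldl (fun d iq =>
            iq.2.2.foldl (fun d' term => d'.modify term [] (fun s => PySem.Set.add s iq.1)) d)
            PySem.Dict.empty).getD term []))
      ([] : PySem.Set Int) with hhits
  set C := (E.filter (fun iq => pvShares ts iq.2)).map (fun iq => iq.1) with hC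
  have hmem : ∀ i : Int, i ∈ hits ↔ i ∈ C := by
    intro i
    rw [hhits, pv_mem_hits]
    simp only [pv_mem_build, PySem.Dict.getD_empty, List.not_mem_nil, false_or, hC,
      List.mem_map, List.mem_filter]
    constructor
    · rintro ⟨t, ht, iq, hiq, htq, hij⟩
      refine ⟨iq, ⟨hiq, ?_⟩, hij.symm⟩
      unfold pvShares
      simp only [decide_eq_true_eq]
      exact ⟨t, ht, htq⟩
    · rintro ⟨iq, ⟨hiq, hsh⟩, hij⟩
      unfold pvShares at hsh
      simp only [decide_eq_true_eq] at hsh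
      obtain ⟨t, ht, htq⟩ := hsh
      exact ⟨t, ht, iq, hiq, htq, hij.symm⟩
  have hnd1 : hits.Nodup := pv_nodup_hits _ _ _ List.nodup_nil
  have hnd2 : C.Nodup := by
    have hp : (E.filter (fun iq => pvShares ts iq.2)).Pairwise
        (fun p q : Int × (String × List String) => p.1 < q.1) :=
      List.Pairwise.sublist (List.filter_sublist) (PySem.List.pairwise_lt_enumerate query_synonyms 0)
    rw [hC]
    exact List.Pairwise.map (S := (· ≠ ·)) (fun iq : Int × (String × List String) => iq.1)
      (fun a b hlt => ne_of_lt hlt) hp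
  have hperm : hits.Perm C := (List.perm_ext_iff_of_nodup hnd1 hnd2).mpr hmem
  have hlen : hits.length = C.length := hperm.length_eq
  have hClen : C.length = (query_synonyms.filter (pvShares ts)).length := by
    rw [hC, List.length_map, ← List.countP_eq_length_filter, ← List.countP_eq_length_filter]
    rw [show (fun (iq : Int × (String × List String)) => pvShares ts iq.2)
        = ((pvShares ts) ∘ (fun iq : Int × (String × List String) => iq.2)) from rfl]
    rw [← List.countP_map, hE, PySem.List.map_snd_enumerate]
  exact hlen.trans hClen

-- ===== VERDICT (by name: the statement is the Claim_ definition above) =====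
theorem find_common_terms_between_synonym_list_spec : Claim_equal_find_common_terms_between_synonym_list := by
  intro tag_synonyms query_synonyms _
  unfold Spec_find_common_terms_between_synonym_list
  rw [pvA_eq]
  simp only [find_common_terms_between_synonym_list_alt]
  rw [PySem.List.foldl_append_eq_flatMap (fun p : String × List String =>
        List.replicate (pvHits (pvIndex query_synonyms) p.2).length p.1)]
  simp only [List.nil_append]
  congr 1
  funext p
  rw [pv_hits_len query_synonyms p.2, List.map_const']
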